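-- pv_equiv track=rewrite | github.com/architecture-building-systems/CityEnergyAnalyst | cea/analysis/final_energy/main.py | _group_errors_by_pattern
-- ===== SOURCE A (Python) =====
-- def _group_errors_by_pattern(errors):
--     """Group building errors by message pattern, stripping building-specific details.
--
--     Returns dict mapping pattern description → list of building names.
--     """
--     grouped = {}
--     for building, msg in errors.items():
--         first_line = msg.split('\n')[0]
--         # Extract text before ' for building' as the pattern key
--         pattern = first_line.split(' for building')[0] if ' for building' in first_line else first_line
--         # Append action hint from second line if present
--         lines = msg.split('\n')
--         if len(lines) > 1 and lines[1].strip().startswith('Please'):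
--             pattern += f"\n    {lines[1].strip()}"
--         if pattern not in grouped:
--             grouped[pattern] = []
--         grouped[pattern].append(building)
--     return grouped
-- ===== SOURCE B (Python) =====
-- def _pattern(msg):
--     """Pattern key for one error message (same extraction rules as the original)."""
--     lines = msg.split('\n')
--     first_line = lines[0]
--     pattern = first_line.split(' for building')[0] if ' for building' in first_line else first_line
--     if len(lines) > 1 and lines[1].strip().startswith('Please'):
--         pattern += f"\n    {lines[1].strip()}"
--     return pattern
--
--
-- def _group_errors_by_pattern(errors):
--     """Group building errors by message pattern, stripping building-specific details.
--
--     Returns dict mapping pattern description → list of building names.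
--     """
--     pairs = [(_pattern(msg), building) for building, msg in errors.items()]
--     return {p: [b for q, b in pairs if q == p]
--             for p in dict.fromkeys(q for q, _ in pairs)}
-- ===== Notes on version B (the rewrite author's own statement) =====
-- stated objective: simpler
-- what changed: Replaces the mutable-dict accumulation loop with a declarative pipeline: compute (pattern, building) pairs once, then build the result as a dict comprehension over the order-preserving deduplicated pattern list, collecting each pattern's buildings by a filter over the pairs.
import Mathlib
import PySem

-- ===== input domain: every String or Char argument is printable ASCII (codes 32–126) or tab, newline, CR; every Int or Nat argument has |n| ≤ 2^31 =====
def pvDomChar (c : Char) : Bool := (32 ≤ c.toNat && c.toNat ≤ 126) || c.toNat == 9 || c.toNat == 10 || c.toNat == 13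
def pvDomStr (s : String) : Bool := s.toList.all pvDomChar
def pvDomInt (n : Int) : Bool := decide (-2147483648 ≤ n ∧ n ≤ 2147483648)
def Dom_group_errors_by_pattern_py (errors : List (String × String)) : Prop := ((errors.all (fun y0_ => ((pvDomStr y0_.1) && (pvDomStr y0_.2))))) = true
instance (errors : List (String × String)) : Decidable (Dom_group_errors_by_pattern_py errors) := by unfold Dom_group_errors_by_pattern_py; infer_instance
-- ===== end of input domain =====

-- B replaces A's mutable-dict accumulation loop by a declarative pipeline (pairs → ordered dedup of patterns → per-pattern filter); same values, not faster.


-- ===== PORT A =====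
-- literal port of A's loop body: pattern extraction, then dict accumulation
-- (lines[1] is ported as pyGetD 1 "": the guard 1 < lines.length makes the index in range, so the default is never used)
def group_errors_by_pattern_py (errors : List (String × String)) : List (String × List String) :=
  (errors.foldl (fun (grouped : PySem.Dict String (List String)) e =>
      let first_line := ((PySem.Str.split? e.2 "\n").getD []).headD ""   -- msg.split('\n')[0]; split? is some (sep ≠ "") and nonempty
      let pattern := if PySem.Str.isIn " for building" first_line then ((PySem.Str.split? first_line " for building").getD []).headD "" else first_line
      let lines := (PySem.Str.split? e.2 "\n").getD []
      let pattern := if 1 < lines.length ∧ PySem.Str.startswith (PySem.Str.strip (PySem.List.pyGetD lines 1 "")) "Please" = true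
                     then pattern ++ "\n    " ++ PySem.Str.strip (PySem.List.pyGetD lines 1 "") else pattern
      let grouped := if (grouped.get? pattern).isNone then grouped.insert pattern [] else grouped
      grouped.insert pattern (grouped.getD pattern [] ++ [e.1])
    ) PySem.Dict.empty).items

-- ===== PORT B =====
-- _pattern(msg) of Source B
def pvPatternB (msg : String) : String :=
  let lines := (PySem.Str.split? msg "\n").getD []
  let first_line := lines.headD ""
  let pattern := if PySem.Str.isIn " for building" first_line then ((PySem.Str.split? first_line " for building").getD []).headD "" else first_line
  if 1 < lines.length ∧ PySem.Str.startswith (PySem.Str.strip (PySem.List.pyGetD lines 1 "")) "Please" = true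
  then pattern ++ "\n    " ++ PySem.Str.strip (PySem.List.pyGetD lines 1 "") else pattern

def group_errors_by_pattern_py_alt (errors : List (String × String)) : List (String × List String) :=
  let pairs := errors.map (fun e => (pvPatternB e.2, e.1))
  (PySem.List.dedup (pairs.map (fun q => q.1))).map
    (fun p => (p, (pairs.filter (fun q => q.1 == p)).map (fun q => q.2)))

-- ===== PRECONDITION & SPEC =====
def Spec_group_errors_by_pattern_py (errors : List (String × String)) (out : List (String × List String)) : Prop := out = group_errors_by_pattern_py_alt errors
instance (errors : List (String × String)) (out : List (String × List String)) : Decidable (Spec_group_errors_by_pattern_py errors out) := by unfold Spec_group_errors_by_pattern_py; infer_instance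

-- ===== CLAIM (what is proved, stated in full; the proofs are below) =====
def Claim_equal_group_errors_by_pattern_py : Prop := ∀ (errors : List (String × String)), Dom_group_errors_by_pattern_py errors → Spec_group_errors_by_pattern_py errors (group_errors_by_pattern_py errors)

-- ===== LEMMAS AND PROOFS =====

-- A's loop body is a single Dict.modify at the pattern key (pvPatternB is definitionally A's pattern computation)
lemma pvStepA_eq_modify (g : PySem.Dict String (List String)) (e : String × String) :
    (let first_line := ((PySem.Str.split? e.2 "\n").getD []).headD ""
     let pattern := if PySem.Str.isIn " for building" first_line then ((PySem.Str.split? first_line " for building").getD []).headD "" else first_line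
     let lines := (PySem.Str.split? e.2 "\n").getD []
     let pattern := if 1 < lines.length ∧ PySem.Str.startswith (PySem.Str.strip (PySem.List.pyGetD lines 1 "")) "Please" = true
                    then pattern ++ "\n    " ++ PySem.Str.strip (PySem.List.pyGetD lines 1 "") else pattern
     let grouped := if (g.get? pattern).isNone then g.insert pattern [] else g
     grouped.insert pattern (grouped.getD pattern [] ++ [e.1]))
    = PySem.Dict.modify g (pvPatternB e.2) [] (· ++ [e.1]) := by
  show (let grouped := if (g.get? (pvPatternB e.2)).isNone then g.insert (pvPatternB e.2) [] else g
        grouped.insert (pvPatternB e.2) (grouped.getD (pvPatternB e.2) [] ++ [e.1]))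
       = g.insert (pvPatternB e.2) (g.getD (pvPatternB e.2) [] ++ [e.1])
  cases h : g.get? (pvPatternB e.2) with
  | none =>
      simp only [Option.isNone_none, if_true]
      rw [PySem.Dict.getD_insert_self, PySem.Dict.insert_insert_self,
        PySem.Dict.getD_of_get?_eq_none g _ h]
  | some v =>
      simp only [Option.isNone_some, Bool.false_eq_true, if_false]

-- the two step functions agree, as functions
lemma pvStepA_funext :
    (fun (grouped : PySem.Dict String (List String)) (e : String × String) =>
      let first_line := ((PySem.Str.split? e.2 "\n").getD []).headD ""
      let pattern := if PySem.Str.isIn " for building" first_line then ((PySem.Str.split? first_line " for building").getD []).headD "" else first_line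
      let lines := (PySem.Str.split? e.2 "\n").getD []
      let pattern := if 1 < lines.length ∧ PySem.Str.startswith (PySem.Str.strip (PySem.List.pyGetD lines 1 "")) "Please" = true
                     then pattern ++ "\n    " ++ PySem.Str.strip (PySem.List.pyGetD lines 1 "") else pattern
      let grouped := if (grouped.get? pattern).isNone then grouped.insert pattern [] else grouped
      grouped.insert pattern (grouped.getD pattern [] ++ [e.1]))
    = (fun (g : PySem.Dict String (List String)) e => PySem.Dict.modify g (pvPatternB e.2) [] (· ++ [e.1])) :=
  funext fun g => funext fun e => pvStepA_eq_modify g e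

-- ===== VERDICT (by name: the statement is the Claim_ definition above) =====
theorem group_errors_by_pattern_py_spec : Claim_equal_group_errors_by_pattern_py := by
  intro errors _
  show group_errors_by_pattern_py errors = group_errors_by_pattern_py_alt errors
  unfold group_errors_by_pattern_py group_errors_by_pattern_py_alt
  rw [pvStepA_funext]
  have hmap : errors.foldl (fun g e => PySem.Dict.modify g (pvPatternB e.2) [] (· ++ [e.1])) PySem.Dict.empty
      = (errors.map (fun e => (pvPatternB e.2, e.1))).foldl
          (fun d p => d.modify p.1 [] (· ++ [p.2])) PySem.Dict.empty := by
    rw [List.foldl_map]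
  rw [hmap]
  set pairs := errors.map (fun e => (pvPatternB e.2, e.1)) with hpairs
  have hnd : ((pairs.foldl (fun d p => d.modify p.1 [] (· ++ [p.2])) PySem.Dict.empty)).keys.Nodup :=
    PySem.Dict.nodup_keys_foldl_modify_key pairs (fun p => p.1) [] (fun _ p => (· ++ [p.2]))
      PySem.Dict.empty (by simp [PySem.Dict.keys_empty])
  rw [PySem.Dict.items_eq_map_keys _ hnd []]
  have hkeys : ((pairs.foldl (fun d p => d.modify p.1 [] (· ++ [p.2])) PySem.Dict.empty)).keys
      = PySem.List.dedup (pairs.map (fun q => q.1)) := by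
    rw [PySem.Dict.keys_foldl_modify_key pairs (fun p => p.1) [] (fun _ p => (· ++ [p.2]))]
    simp [PySem.Dict.keys_empty, PySem.Set.update, PySem.List.dedup_eq_ofList, PySem.Set.ofList_eq_foldl]
  rw [hkeys]
  refine List.map_congr_left ?_
  intro k _
  rw [PySem.Dict.getD_foldl_modify_append]
  simp [PySem.Dict.getD_empty]
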